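-- pv_equiv track=rewrite | github.com/markpekun/linkShortener | src/utils/short_code.py | encode_short_code
-- ===== SOURCE A (Python) =====
-- SHORT_CODE_ALPHABET = "ABCDEFGHIJKLMNOPQRSTUVWXYZabcdefghijklmnopqrstuvwxyz"
--
-- SHORT_CODE_RADIX = len(SHORT_CODE_ALPHABET)
--
-- def encode_short_code(number: int) -> str:
--     if number < 0:
--         raise ValueError("Number must be non-negative")
--     if number == 0:
--         return SHORT_CODE_ALPHABET[0]
--
--     encoded: list[str] = []
--     current = number
--     while current > 0:
--         current, remainder = divmod(current, SHORT_CODE_RADIX)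
--         encoded.append(SHORT_CODE_ALPHABET[remainder])
--     return "".join(reversed(encoded))
-- ===== SOURCE B (Python) =====
-- SHORT_CODE_ALPHABET = "ABCDEFGHIJKLMNOPQRSTUVWXYZabcdefghijklmnopqrstuvwxyz"
--
-- SHORT_CODE_RADIX = len(SHORT_CODE_ALPHABET)
--
-- def encode_short_code(number: int) -> str:
--     if number < 0:
--         raise ValueError("Number must be non-negative")
--     power = 1
--     while power * SHORT_CODE_RADIX <= number:
--         power *= SHORT_CODE_RADIX
--     out = ""
--     while power > 0:
--         out += SHORT_CODE_ALPHABET[number // power]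
--         number %= power
--         power //= SHORT_CODE_RADIX
--     return out
-- ===== Notes on version B (the rewrite author's own statement) =====
-- stated objective: alternative
-- what changed: B emits digits most-significant-first by first computing the largest power of the radix not exceeding the number, then peeling off the leading digit with floor division and reducing by the power at each step, so it needs no digit list, no reversal, and no zero special case.
import Mathlib
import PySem

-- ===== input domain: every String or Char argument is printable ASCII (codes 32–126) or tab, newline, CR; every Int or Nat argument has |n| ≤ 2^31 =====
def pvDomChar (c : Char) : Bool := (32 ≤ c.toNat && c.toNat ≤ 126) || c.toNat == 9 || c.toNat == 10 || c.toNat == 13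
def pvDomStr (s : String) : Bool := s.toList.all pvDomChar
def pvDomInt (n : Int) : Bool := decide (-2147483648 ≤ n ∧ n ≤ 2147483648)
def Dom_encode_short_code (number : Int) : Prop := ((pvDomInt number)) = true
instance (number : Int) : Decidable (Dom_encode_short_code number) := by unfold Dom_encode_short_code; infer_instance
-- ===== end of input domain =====

-- B encodes most-significant digit first by first finding the largest power of 52
-- not exceeding the number; no digit list, no reversal, no zero special case ("alternative").

-- ===== PORT A =====
-- SHORT_CODE_ALPHABET as its character list (digits are single chars; "".join of
-- one-char strings = String.ofList of the char list, exact here)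
def pvAlpha : List Char := "ABCDEFGHIJKLMNOPQRSTUVWXYZabcdefghijklmnopqrstuvwxyz".toList

-- A's `while current > 0` loop; `encoded.append(ALPHABET[remainder])` appends one char;
-- pyGetD default ' ' is never used (0 ≤ mod < 52 = len alphabet)
def pvLoopA (current : Int) (encoded : List Char) : List Char :=
  if _h : current > 0 then
    pvLoopA (PySem.Int.floordiv current 52)
      (encoded ++ [PySem.List.pyGetD pvAlpha (PySem.Int.mod current 52) ' '])
  else encoded
termination_by current.toNat
decreasing_by
  have _h1 : PySem.Int.floordiv current 52 = current / 52 :=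
    PySem.Int.floordiv_eq_ediv_of_pos (by omega)
  have h2 : current / 52 < current := by apply Int.ediv_lt_of_lt_mul (by omega); omega
  simp; omega

def encode_short_code (number : Int) : String :=
  if number < 0 then ""           -- Python raises ValueError here; excluded by Pre_
  else if number = 0 then String.ofList [PySem.List.pyGetD pvAlpha 0 ' ']
  else String.ofList ((pvLoopA number []).reverse)

-- ===== PORT B =====
-- B's first loop: `while power * 52 <= number: power *= 52`; the `0 < power` conjunct only
-- makes the Lean recursion total (Python always calls it with power = 1 > 0, an invariant)
def pvPowLoopB (power number : Int) : Int :=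
  if _h : 0 < power ∧ power * 52 ≤ number then pvPowLoopB (power * 52) number
  else power
termination_by (number - power).toNat
decreasing_by omega

-- B's second loop: out += ALPHABET[number // power]; number %= power; power //= 52
def pvEmitLoopB (power number : Int) (out : List Char) : List Char :=
  if _h : 0 < power then
    pvEmitLoopB (PySem.Int.floordiv power 52) (PySem.Int.mod number power)
      (out ++ [PySem.List.pyGetD pvAlpha (PySem.Int.floordiv number power) ' '])
  else out
termination_by power.toNat
decreasing_by
  have _h1 : PySem.Int.floordiv power 52 = power / 52 :=
    PySem.Int.floordiv_eq_ediv_of_pos (by omega)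
  have h2 : power / 52 < power := by apply Int.ediv_lt_of_lt_mul (by omega); omega
  simp; omega

def encode_short_code_alt (number : Int) : String :=
  if number < 0 then ""           -- Python raises ValueError here; excluded by Pre_
  else String.ofList (pvEmitLoopB (pvPowLoopB 1 number) number [])

-- ===== PRECONDITION & SPEC =====
-- A raises ValueError exactly on negative numbers; those inputs are excluded.
def Pre_encode_short_code (number : Int) : Prop := 0 ≤ number
instance (number : Int) : Decidable (Pre_encode_short_code number) := by
  unfold Pre_encode_short_code; infer_instance

def pvWitness_encode_short_code : Int := (7)

def Spec_encode_short_code (number : Int) (out : String) : Prop := out = encode_short_code_alt number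
instance (number : Int) (out : String) : Decidable (Spec_encode_short_code number out) := by unfold Spec_encode_short_code; infer_instance

-- ===== CLAIM (what is proved, stated in full; the proofs are below) =====
def Claim_equal_encode_short_code : Prop := ∀ (number : Int), Dom_encode_short_code number → Pre_encode_short_code number → Spec_encode_short_code number (encode_short_code number)

-- ===== LEMMAS AND PROOFS =====

-- canonical most-significant-first digit list (proof-only helper)
def pvDigits (n : Int) : List Char :=
  if _h : n ≤ 0 then []
  else pvDigits (n / 52) ++ [PySem.List.pyGetD pvAlpha (n % 52) ' ']
termination_by n.toNat
decreasing_by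
  have h2 : n / 52 < n := by apply Int.ediv_lt_of_lt_mul (by omega); omega
  simp; omega

-- digits of n zero-padded on the left to exactly k positions (proof-only helper)
def pvPad : Nat → Int → List Char
  | 0, _ => []
  | k+1, n => PySem.List.pyGetD pvAlpha (n / 52 ^ k) ' ' :: pvPad k (n % 52 ^ k)

-- A's loop collects the digits least-significant-first after `encoded`
lemma pvLoop_rev (k : Nat) : ∀ (n : Int), 0 ≤ n → n.toNat ≤ k →
    ∀ (acc : List Char), (pvLoopA n acc).reverse = pvDigits n ++ acc.reverse := by
  induction k with
  | zero =>
    intro n hn hk acc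
    have hn0 : n = 0 := by omega
    rw [pvLoopA, pvDigits]
    simp [hn0]
  | succ k ih =>
    intro n hn hk acc
    rw [pvLoopA, pvDigits]
    by_cases h : n > 0
    · have h1 : PySem.Int.floordiv n 52 = n / 52 :=
        PySem.Int.floordiv_eq_ediv_of_pos (by omega)
      have hm : PySem.Int.mod n 52 = n % 52 := PySem.Int.mod_eq_emod_of_pos (by omega)
      have h2 : n / 52 < n := by apply Int.ediv_lt_of_lt_mul (by omega); omega
      have h3 : 0 ≤ n / 52 := Int.ediv_nonneg (by omega) (by omega)
      simp only [h, dif_pos, dif_neg (by omega : ¬ n ≤ 0)]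
      rw [ih (PySem.Int.floordiv n 52) (by rw [h1]; exact h3) (by rw [h1]; omega), h1, hm]
      simp
    · have hn0 : n = 0 := by omega
      simp [hn0]

-- one-step unfolding of pvPad (structural, rfl)
lemma pvPad_succ (k : Nat) (n : Int) :
    pvPad (k+1) n = PySem.List.pyGetD pvAlpha (n / 52 ^ k) ' ' :: pvPad k (n % 52 ^ k) := rfl

-- the MSD decomposition of a padded digit block
lemma pvPad_msd : ∀ (k : Nat) (m : Int), 0 ≤ m → m < 52 ^ (k+1) →
    pvPad (k+1) m = pvPad k (m / 52) ++ [PySem.List.pyGetD pvAlpha (m % 52) ' '] := by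
  intro k
  induction k with
  | zero =>
    intro m hm hlt
    have h1 : m / 52 ^ 0 = m % 52 := by simp at hlt ⊢; omega
    rw [pvPad_succ, h1]
    simp [pvPad]
  | succ k ih =>
    intro m hm hlt
    have hpow : (0:Int) < 52 ^ (k+1) := by positivity
    have hmod_nonneg : 0 ≤ m % 52 ^ (k+1) := Int.emod_nonneg m (by positivity)
    have hmod_lt : m % 52 ^ (k+1) < 52 ^ (k+1) := Int.emod_lt_of_pos m hpow
    have h52 : ((52:Int)) ≠ 0 := by norm_num
    have e1 : (m % 52 ^ (k+1)) / 52 = (m / 52) % 52 ^ k := by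
      rw [Int.emod_def m (52^(k+1)), Int.emod_def (m/52) (52^k),
          Int.ediv_ediv_of_nonneg (by norm_num : (0:Int) ≤ 52)]
      rw [show m - 52^(k+1) * (m / 52^(k+1))
            = m + (-(52^k * (m / 52^(k+1)))) * 52 by ring]
      rw [Int.add_mul_ediv_right _ _ h52,
          show (52:Int) * 52^k = 52^(k+1) from (pow_succ' 52 k).symm]
      ring
    have e2 : (m % 52 ^ (k+1)) % 52 = m % 52 :=
      Int.emod_emod_of_dvd m (dvd_pow_self 52 (Nat.succ_ne_zero k))
    have e3 : (m / 52) / 52 ^ k = m / 52 ^ (k+1) := by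
      rw [Int.ediv_ediv_of_nonneg (by norm_num : (0:Int) ≤ 52),
          show (52:Int) * 52^k = 52^(k+1) from (pow_succ' 52 k).symm]
    rw [pvPad_succ (k+1) m, ih _ hmod_nonneg hmod_lt, e1, e2,
        pvPad_succ k (m/52), e3]
    simp

-- unpadded digits of an exact-width number are the padded block
lemma pvDigits_pad : ∀ (k : Nat) (n : Int), 52 ^ k ≤ n → n < 52 ^ (k+1) →
    pvDigits n = pvPad (k+1) n := by
  intro k
  induction k with
  | zero =>
    intro n h1 h2
    rw [pvDigits, pvDigits]
    simp only [pvPad]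
    have e1 : n / 52 = 0 := by
      apply Int.ediv_eq_zero_of_lt <;> simp at h1 h2 ⊢ <;> omega
    have e2 : n % 52 = n := by
      simp at h1 h2; omega
    have e3 : n / 52 ^ 0 = n := by simp
    rw [e1, e2, e3]
    simp only [dif_neg (by simp at h1; omega : ¬ n ≤ 0), dif_pos (le_refl (0:Int))]
    simp
  | succ k ih =>
    intro n h1 h2
    have hpow : (0:Int) < 52 ^ k := by positivity
    have hq1 : 52 ^ k ≤ n / 52 := by
      rw [Int.le_ediv_iff_mul_le (by omega)]
      calc (52:Int) ^ k * 52 = 52 ^ (k+1) := by ring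
        _ ≤ n := h1
    have hq2 : n / 52 < 52 ^ (k+1) := by
      rw [Int.ediv_lt_iff_lt_mul (by omega)]
      calc n < 52 ^ (k+2) := h2
        _ = 52 ^ (k+1) * 52 := by ring
    have hn0 : ¬ n ≤ 0 := by nlinarith
    rw [pvDigits, dif_neg hn0, ih (n / 52) hq1 hq2,
        pvPad_msd (k+1) n (by nlinarith) h2]

-- B's emit loop with power = 52^k writes the padded k+1-digit block
lemma pvEmit_pad : ∀ (k : Nat) (n : Int), 0 ≤ n → n < 52 ^ (k+1) →
    ∀ (out : List Char), pvEmitLoopB (52 ^ k) n out = out ++ pvPad (k+1) n := by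
  intro k
  induction k with
  | zero =>
    intro n hn hlt out
    rw [pow_zero, pvEmitLoopB, dif_pos (by norm_num : (0:Int) < 1)]
    have e1 : PySem.Int.floordiv (1:Int) 52 = 0 := by
      rw [PySem.Int.floordiv_eq_ediv_of_pos (by norm_num)]; decide
    have e2 : PySem.Int.floordiv n 1 = n := by
      rw [PySem.Int.floordiv_eq_ediv_of_pos (by norm_num)]; simp
    rw [e1, e2, pvEmitLoopB, dif_neg (by norm_num : ¬ (0:Int) < 0)]
    simp [pvPad]
  | succ k ih =>
    intro n hn hlt out
    have hpow : (0:Int) < 52 ^ (k+1) := by positivity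
    rw [pvEmitLoopB, dif_pos hpow]
    have e1 : PySem.Int.floordiv ((52:Int) ^ (k+1)) 52 = 52 ^ k := by
      rw [PySem.Int.floordiv_eq_ediv_of_pos (by omega), pow_succ, Int.mul_ediv_cancel _ (by omega)]
    have e2 : PySem.Int.mod n (52 ^ (k+1)) = n % 52 ^ (k+1) :=
      PySem.Int.mod_eq_emod_of_pos hpow
    have e3 : PySem.Int.floordiv n (52 ^ (k+1)) = n / 52 ^ (k+1) :=
      PySem.Int.floordiv_eq_ediv_of_pos hpow
    rw [e1, e2, e3,
        ih (n % 52 ^ (k+1)) (Int.emod_nonneg n (by positivity)) (Int.emod_lt_of_pos n hpow)]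
    simp [pvPad]

-- B's power loop returns the exact power of 52 bracketing a positive number
lemma pvPow_spec (fuel : Nat) : ∀ (p n : Int), 0 < p → (n - p).toNat ≤ fuel →
    ∃ k : Nat, pvPowLoopB p n = p * 52 ^ k ∧ n < p * 52 ^ (k+1) ∧ (p ≤ n → p * 52 ^ k ≤ n) := by
  induction fuel with
  | zero =>
    intro p n hp hf
    rw [pvPowLoopB]
    have hno : ¬ (0 < p ∧ p * 52 ≤ n) := by omega
    rw [dif_neg hno]
    exact ⟨0, by ring_nf, by simp; omega, by simp⟩
  | succ fuel ih =>
    intro p n hp hf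
    rw [pvPowLoopB]
    by_cases h : p * 52 ≤ n
    · rw [dif_pos ⟨hp, h⟩]
      obtain ⟨k, hk1, hk2, hk3⟩ := ih (p * 52) n (by omega) (by omega)
      refine ⟨k + 1, by rw [hk1]; ring, ?_, fun _ => ?_⟩
      · rw [show p * 52 ^ (k+1+1) = p * 52 * 52 ^ (k+1) by ring]
        exact hk2
      · have := hk3 h
        calc p * 52 ^ (k+1) = p * 52 * 52 ^ k := by ring
          _ ≤ n := this
    · rw [dif_neg (by tauto)]
      exact ⟨0, by ring_nf, by simp; nlinarith, by simp⟩

theorem encode_short_code_spec : Claim_equal_encode_short_code := by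
  intro number _ hpre
  unfold Spec_encode_short_code encode_short_code encode_short_code_alt
  unfold Pre_encode_short_code at hpre
  rw [if_neg (by omega : ¬ number < 0), if_neg (by omega : ¬ number < 0)]
  by_cases h0 : number = 0
  · subst h0
    rw [if_pos rfl]
    have hp : pvPowLoopB 1 0 = 1 := by rw [pvPowLoopB]; norm_num
    have e1 : PySem.Int.floordiv (1:Int) 52 = 0 := by
      rw [PySem.Int.floordiv_eq_ediv_of_pos (by norm_num)]; decide
    have e2 : PySem.Int.floordiv (0:Int) 1 = 0 := by
      rw [PySem.Int.floordiv_eq_ediv_of_pos (by norm_num)]; decide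
    have e3 : PySem.Int.mod (0:Int) 1 = 0 := by
      rw [PySem.Int.mod_eq_emod_of_pos (by norm_num)]; decide
    have he : pvEmitLoopB 1 0 [] = [PySem.List.pyGetD pvAlpha 0 ' '] := by
      rw [pvEmitLoopB, dif_pos (by norm_num : (0:Int) < 1), e1, e2, e3,
          pvEmitLoopB, dif_neg (by norm_num : ¬ (0:Int) < 0)]
      simp
    rw [hp, he]
  · rw [if_neg h0]
    obtain ⟨k, hk1, hk2, hk3⟩ :=
      pvPow_spec (number - 1).toNat 1 number (by omega) (by omega)
    simp only [one_mul] at hk1 hk2 hk3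
    rw [hk1, pvEmit_pad k number hpre hk2 [],
        pvLoop_rev number.toNat number hpre (le_refl _) []]
    rw [pvDigits_pad k number (hk3 (by omega)) hk2]
    simp
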